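-- pv_equiv track=rewrite | github.com/voyage-li/study | CS61A/PROJECT/cats/cats.py | shifty_shifts
-- ===== SOURCE A (Python) =====
-- def shifty_shifts(start, goal, limit):
--     """A diff function for autocorrect that determines how many letters
--     in START need to be substituted to create GOAL, then adds the difference in
--     their lengths.
--     """
--     # BEGIN PROBLEM 6
--     if len(start) == 0:
--         return len(goal)
--     if len(goal) == 0:
--         return len(start)
--     if start[0] != goal[0]:
--         if limit == 0:
--             return 1
--         else:
--             return 1 + shifty_shifts(start[1:], goal[1:], limit-1)
--     else:
--         return shifty_shifts(start[1:], goal[1:], limit)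
-- ===== SOURCE B (Python) =====
-- def shifty_shifts(start, goal, limit):
--     count = 0
--     for a, b in zip(start, goal):
--         if a != b:
--             if limit == 0:
--                 return count + 1
--             count += 1
--             limit -= 1
--     return count + abs(len(start) - len(goal))
-- ===== Notes on version B (the rewrite author's own statement) =====
-- stated objective: faster
-- what changed: Replaced the slicing recursion with a single iterative pass over zip(start, goal) carrying a mismatch counter and the remaining limit, returning count+1 early when the cap is hit and adding the length difference at the end.
import Mathlib
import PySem

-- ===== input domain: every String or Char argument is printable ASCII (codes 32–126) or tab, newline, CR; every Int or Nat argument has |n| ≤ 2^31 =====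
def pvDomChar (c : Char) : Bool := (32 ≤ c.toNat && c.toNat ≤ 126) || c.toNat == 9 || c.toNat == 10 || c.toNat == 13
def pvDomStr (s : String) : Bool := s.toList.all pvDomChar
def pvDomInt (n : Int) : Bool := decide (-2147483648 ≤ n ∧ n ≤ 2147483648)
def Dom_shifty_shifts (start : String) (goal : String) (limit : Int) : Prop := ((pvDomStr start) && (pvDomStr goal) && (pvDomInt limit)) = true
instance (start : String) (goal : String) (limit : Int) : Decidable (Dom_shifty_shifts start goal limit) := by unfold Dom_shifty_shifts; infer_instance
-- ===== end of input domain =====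

-- B replaces A's O(n^2) slicing recursion by one index-free linear pass over the zipped characters (asymptotically faster).


-- ===== PORT A =====
-- A's recursion on the two strings; start[1:]/goal[1:] are the list tails.
def shiftyRecA : List Char → List Char → Int → Int
  | [], g, _ => (g.length : Int)
  | s, [], _ => (s.length : Int)
  | a :: s', b :: g', limit =>
    if a ≠ b then
      if limit = 0 then 1 else 1 + shiftyRecA s' g' (limit - 1)
    else
      shiftyRecA s' g' limit

def shifty_shifts (start : String) (goal : String) (limit : Int) : Int :=
  shiftyRecA start.toList goal.toList limit

-- ===== PORT B =====
-- B's single loop over zip(start, goal) with (count, limit) state and early return.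
def shiftyLoopB : List (Char × Char) → Int → Int → Int → Int
  | [], count, _, fin => count + fin
  | (a, b) :: rest, count, limit, fin =>
    if a ≠ b then
      if limit = 0 then count + 1
      else shiftyLoopB rest (count + 1) (limit - 1) fin
    else
      shiftyLoopB rest count limit fin

def shifty_shifts_alt (start : String) (goal : String) (limit : Int) : Int :=
  shiftyLoopB (start.toList.zip goal.toList) 0 limit
    |((start.toList.length : Int) - (goal.toList.length : Int))|

-- ===== PRECONDITION & SPEC =====
def Spec_shifty_shifts (start : String) (goal : String) (limit : Int) (out : Int) : Prop := out = shifty_shifts_alt start goal limit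
instance (start : String) (goal : String) (limit : Int) (out : Int) : Decidable (Spec_shifty_shifts start goal limit out) := by unfold Spec_shifty_shifts; infer_instance

-- ===== CLAIM (what is proved, stated in full; the proofs are below) =====
def Claim_equal_shifty_shifts : Prop := ∀ (start : String) (goal : String) (limit : Int), Dom_shifty_shifts start goal limit → Spec_shifty_shifts start goal limit (shifty_shifts start goal limit)

-- ===== LEMMAS AND PROOFS =====

theorem shiftyLoopB_eq (s : List Char) : ∀ (g : List Char) (limit count fin : Int),
    fin = |(s.length : Int) - (g.length : Int)| →
    shiftyLoopB (s.zip g) count limit fin = count + shiftyRecA s g limit := by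
  induction s with
  | nil =>
    intro g limit count fin hfin
    cases g with
    | nil => simp_all [shiftyLoopB, shiftyRecA]
    | cons b g' =>
      simp_all [shiftyLoopB, shiftyRecA]
      rw [show (-1 + -((g'.length : Int))) = -(((g'.length : Int)) + 1) from by ring, abs_neg]
      exact abs_of_nonneg (by positivity)
  | cons a s' ih =>
    intro g limit count fin hfin
    cases g with
    | nil =>
      simp [shiftyLoopB, shiftyRecA, hfin]
      positivity
    | cons b g' =>
      have hfin' : fin = |(s'.length : Int) - (g'.length : Int)| := by
        simp at hfin; omega
      by_cases hab : a = b
      · simp [shiftyLoopB, shiftyRecA, hab, ih g' limit count fin hfin']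
      · by_cases hl : limit = 0
        · simp [shiftyLoopB, shiftyRecA, hab, hl]
        · simp [shiftyLoopB, shiftyRecA, hab, hl, ih g' (limit - 1) (count + 1) fin hfin']
          ring

-- ===== VERDICT (by name: the statement is the Claim_ definition above) =====
theorem shifty_shifts_spec : Claim_equal_shifty_shifts := by
  intro start goal limit _
  unfold Spec_shifty_shifts shifty_shifts shifty_shifts_alt
  rw [shiftyLoopB_eq start.toList goal.toList limit 0 _ rfl]
  ring
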